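-- pv_equiv track=rewrite | github.com/981377660LMT/algorithm-study | 6_tree/前缀树trie/6183. 字符串的前缀分数和.py | sumPrefixScores2
-- ===== SOURCE A (Python) =====
-- from collections import defaultdict
-- from typing import List
--
-- def sumPrefixScores2(words: List[str]) -> List[int]:
--     """2. 暴力切片
--
--     # !python 暴力 4400ms js 暴力 9000ms  python 字符串切片比js快很多
--     # !字符串长度<=1000时 字符串切片可以当作常数时间
--     """
--     mp = defaultdict(int)
--     for word in words:
--         for i in range(len(word)):
--             mp[word[: i + 1]] += 1
--
--     res = []
--     for word in words:
--         count = 0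
--         for i in range(len(word)):
--             count += mp[word[: i + 1]]
--         res.append(count)
--     return res
-- ===== SOURCE B (Python) =====
-- from typing import List
--
-- def _lcp(a: str, b: str) -> int:
--     """Length of the longest common prefix of a and b (scan while heads agree)."""
--     k = 0
--     m = min(len(a), len(b))
--     while k < m and a[k] == b[k]:
--         k += 1
--     return k
--
-- def sumPrefixScores2(words: List[str]) -> List[int]:
--     # score(w) = sum over all v of lcp(w, v): prefix-count sums without any dictionary.
--     return [sum(_lcp(w, v) for v in words) for w in words]
-- ===== Notes on version B (the rewrite author's own statement) =====
-- stated objective: alternative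
-- what changed: Replaces A's prefix-count dictionary (built and re-queried by repeated string slicing) with a direct pairwise computation: each word's score is the sum over all words of their longest-common-prefix length, so no dictionary or slices are needed.
import Mathlib
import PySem

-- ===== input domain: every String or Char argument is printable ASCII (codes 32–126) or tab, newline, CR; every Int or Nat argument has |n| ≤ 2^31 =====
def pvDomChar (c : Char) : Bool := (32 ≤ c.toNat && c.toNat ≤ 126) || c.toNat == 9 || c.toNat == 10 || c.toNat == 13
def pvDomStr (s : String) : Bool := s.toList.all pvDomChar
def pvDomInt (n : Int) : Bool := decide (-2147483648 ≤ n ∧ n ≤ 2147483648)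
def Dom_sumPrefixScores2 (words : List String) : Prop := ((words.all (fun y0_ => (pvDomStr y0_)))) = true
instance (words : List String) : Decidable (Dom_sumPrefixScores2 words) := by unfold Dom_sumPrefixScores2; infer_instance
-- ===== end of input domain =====

-- B replaces A's prefix-count dictionary with a direct pairwise longest-common-prefix
-- sum (no dictionary, no slicing): a different algorithm returning the same values.

-- ===== PORT A =====
-- literal port of A: build a defaultdict of prefix counts by slicing, then sum the
-- counts of each word's prefixes (the defaultdict reads in the second loop hit only
-- keys inserted in the first loop, so porting the read as getD is value-exact).
def sumPrefixScores2 (words : List String) : List Int :=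
  let mp := words.foldl
    (fun mp word =>
      (PySem.List.pyRange 0 (PySem.Str.len word) 1).foldl
        (fun mp i => mp.modify (PySem.Str.slice word none (some (i + 1))) 0 (· + 1)) mp)
    PySem.Dict.empty
  words.foldl
    (fun res word =>
      res ++ [(PySem.List.pyRange 0 (PySem.Str.len word) 1).foldl
        (fun count i => count + mp.getD (PySem.Str.slice word none (some (i + 1))) 0) 0])
    []

-- ===== PORT B =====
-- helper of B: length of the longest common prefix, structural recursion as in Source B
def pvLcp : List Char → List Char → Int
  | a :: as, b :: bs => if a == b then 1 + pvLcp as bs else 0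
  | _, _ => 0

def sumPrefixScores2_alt (words : List String) : List Int :=
  words.map (fun w => (words.map (fun v => pvLcp w.toList v.toList)).sum)

-- ===== PRECONDITION & SPEC =====
def Spec_sumPrefixScores2 (words : List String) (out : List Int) : Prop := out = sumPrefixScores2_alt words
instance (words : List String) (out : List Int) : Decidable (Spec_sumPrefixScores2 words out) := by unfold Spec_sumPrefixScores2; infer_instance

-- ===== CLAIM (what is proved, stated in full; the proofs are below) =====
def Claim_equal_sumPrefixScores2 : Prop := ∀ (words : List String), Dom_sumPrefixScores2 words → Spec_sumPrefixScores2 words (sumPrefixScores2 words)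

-- ===== LEMMAS AND PROOFS =====

-- Nat-valued twin of pvLcp, convenient for arithmetic
def pvLcpN : List Char → List Char → Nat
  | a :: as, b :: bs => if a = b then 1 + pvLcpN as bs else 0
  | _, _ => 0

-- the nonempty prefixes of a word, as char lists
def pvPrefs (w : List Char) : List (List Char) := (List.range w.length).map (fun k => w.take (k+1))

-- the same prefixes as strings (what A's dict is keyed by)
def pvPrefsS (w : String) : List String := (pvPrefs w.toList).map String.ofList

theorem pvLcp_eq (a b : List Char) : pvLcp a b = (pvLcpN a b : Int) := by
  induction a generalizing b with
  | nil => cases b <;> simp [pvLcp, pvLcpN]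
  | cons x as ih =>
    cases b with
    | nil => simp [pvLcp, pvLcpN]
    | cons y bs =>
      by_cases h : x = y <;> simp [pvLcp, pvLcpN, h, ih]

theorem pvLcpN_le_left (a b : List Char) : pvLcpN a b ≤ a.length := by
  induction a generalizing b with
  | nil => cases b <;> simp [pvLcpN]
  | cons x as ih =>
    cases b with
    | nil => simp [pvLcpN]
    | cons y bs =>
      by_cases h : x = y <;> simp [pvLcpN, h]
      have := ih bs
      omega

theorem pvLcpN_iff (a b : List Char) (k : Nat) :
    k + 1 ≤ pvLcpN a b ↔ k < a.length ∧ k < b.length ∧ a.take (k+1) = b.take (k+1) := by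
  induction a generalizing b k with
  | nil => cases b <;> simp [pvLcpN]
  | cons x as ih =>
    cases b with
    | nil => simp [pvLcpN]
    | cons y bs =>
      by_cases h : x = y
      · cases k with
        | zero => simp [pvLcpN, h]
        | succ k' =>
          subst h
          simp only [pvLcpN, if_true, List.take_succ_cons, List.cons.injEq,
            List.length_cons, true_and, Nat.add_lt_add_iff_right]
          rw [show (k' + 1 + 1 ≤ 1 + pvLcpN as bs) ↔ (k' + 1 ≤ pvLcpN as bs) from by omega,
            ih bs k']
      · simp [pvLcpN, h, List.take_succ_cons]

theorem pvInjOfList : Function.Injective String.ofList :=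
  fun a b h => by simpa using congrArg String.toList h

theorem pvNodupPrefs (y : List Char) : (pvPrefs y).Nodup := by
  unfold pvPrefs
  refine List.Nodup.map_on ?_ (List.nodup_range)
  intro i hi j hj hf
  have hi' : i < y.length := List.mem_range.mp hi
  have hj' : j < y.length := List.mem_range.mp hj
  have : (y.take (i+1)).length = (y.take (j+1)).length := by rw [hf]
  simp [List.length_take] at this
  omega

theorem pvMemPrefs (x y : List Char) (k : Nat) (hk : k < x.length) :
    x.take (k+1) ∈ pvPrefs y ↔ k + 1 ≤ pvLcpN x y := by
  rw [pvLcpN_iff]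
  constructor
  · intro h
    unfold pvPrefs at h
    obtain ⟨j, hj, hje⟩ := List.mem_map.mp h
    have hj' : j < y.length := List.mem_range.mp hj
    have hlen : (y.take (j+1)).length = (x.take (k+1)).length := by rw [hje]
    simp [List.length_take] at hlen
    have : j = k := by omega
    subst this
    exact ⟨hk, hj', hje.symm⟩
  · rintro ⟨_, hky, heq⟩
    unfold pvPrefs
    exact List.mem_map.mpr ⟨k, List.mem_range.mpr hky, heq.symm⟩

theorem pvCountPrefs (x y : List Char) (k : Nat) (hk : k < x.length) :
    (pvPrefs y).count (x.take (k+1)) = if k + 1 ≤ pvLcpN x y then 1 else 0 := by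
  by_cases h : k + 1 ≤ pvLcpN x y
  · rw [if_pos h]
    exact List.count_eq_one_of_mem (pvNodupPrefs y) ((pvMemPrefs x y k hk).mpr h)
  · rw [if_neg h]
    exact List.count_eq_zero_of_not_mem (fun hm => h ((pvMemPrefs x y k hk).mp hm))

theorem pvSumIndicator (L n : Nat) :
    ((List.range n).map (fun k => if k + 1 ≤ L then (1:Int) else 0)).sum = ((min L n : Nat) : Int) := by
  induction n with
  | zero => simp
  | succ n ih =>
    rw [List.range_succ, List.map_append, List.sum_append, ih]
    simp only [List.map_cons, List.map_nil, List.sum_cons, List.sum_nil]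
    split_ifs with h <;> push_cast <;> omega

-- per-pair: summing y's prefix counts over x's prefixes is exactly lcp(x, y)
theorem pvPairSum (x y : List Char) :
    ((List.range x.length).map (fun k => ((pvPrefs y).count (x.take (k+1)) : Int))).sum
      = pvLcp x y := by
  have hc : ∀ k ∈ List.range x.length,
      ((pvPrefs y).count (x.take (k+1)) : Int) = if k + 1 ≤ pvLcpN x y then (1:Int) else 0 := by
    intro k hk
    rw [pvCountPrefs x y k (List.mem_range.mp hk)]
    push_cast
    rfl
  rw [List.map_congr_left hc, pvSumIndicator, pvLcp_eq]
  have := pvLcpN_le_left x y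
  congr 1
  omega

theorem pvCountFlatMap {α β : Type} [BEq β] [LawfulBEq β] (l : List α) (f : α → List β) (p : β) :
    ((l.flatMap f).count p : Int) = (l.map (fun v => ((f v).count p : Int))).sum := by
  induction l with
  | nil => simp
  | cons a t ih =>
    simp only [List.flatMap_cons, List.count_append, List.map_cons, List.sum_cons, ← ih]
    push_cast
    ring

theorem pvSumSwap {α β : Type} (l : List α) (m : List β) (g : α → β → Int) :
    (l.map (fun a => (m.map (fun b => g a b)).sum)).sum
      = (m.map (fun b => (l.map (fun a => g a b)).sum)).sum := by
  induction l with
  | nil => simp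
  | cons a t ih =>
    simp only [List.map_cons, List.sum_cons, ih, ← PySem.List.sum_map_add_int]

-- A's slice word[:i+1] at a natural index i=k is the (k+1)-prefix
theorem pvSlice (w : String) (k : Nat) :
    PySem.Str.slice w none (some ((k:Int) + 1)) = String.ofList (w.toList.take (k+1)) := by
  simp only [PySem.Str.slice, PySem.Chars.slice]
  rw [PySem.List.slice_to _ (by positivity)]
  have h1 : ((k:Int) + 1).toNat = k + 1 := by omega
  rw [h1]

-- both loops over range(len(word)) in A are loops over the word's prefixes
theorem pvLoopPrefs {β : Type} (w : String) (f : β → String → β) (init : β) :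
    (PySem.List.pyRange 0 (PySem.Str.len w) 1).foldl
      (fun acc i => f acc (PySem.Str.slice w none (some (i + 1)))) init
    = (pvPrefsS w).foldl f init := by
  rw [show PySem.Str.len w = ((w.toList.length : Nat) : Int) by simp [PySem.Str.len_eq]]
  rw [PySem.List.pyRange_zero_nat, List.foldl_map]
  unfold pvPrefsS pvPrefs
  rw [List.foldl_map, List.foldl_map]
  exact PySem.List.foldl_congr_mem _ _ _ _ (fun acc k _ => by rw [pvSlice])

-- A's first loop: the dict maps each prefix to its total occurrence count
theorem pvGetDBuild (words : List String) (p : String) :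
    (words.foldl
      (fun mp word =>
        (PySem.List.pyRange 0 (PySem.Str.len word) 1).foldl
          (fun mp i => mp.modify (PySem.Str.slice word none (some (i + 1))) 0 (· + 1)) mp)
      (PySem.Dict.empty : PySem.Dict String Int)).getD p 0
    = ((words.flatMap pvPrefsS).count p : Int) := by
  rw [PySem.List.foldl_congr_mem _ _
    (fun mp word => (pvPrefsS word).foldl (fun mp q => mp.modify q 0 (· + 1)) mp) _
    (fun mp word _ => pvLoopPrefs word (fun mp q => mp.modify q 0 (· + 1)) mp)]
  rw [← List.foldl_flatMap, PySem.Dict.getD_foldl_modify_add_one]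
  simp

-- per-word: summing all-words prefix counts over x's prefixes is the lcp sum
theorem pvInner (x v : String) :
    ((pvPrefsS x).map (fun p => ((pvPrefsS v).count p : Int))).sum
      = pvLcp x.toList v.toList := by
  unfold pvPrefsS
  rw [List.map_map]
  have hc : ∀ q ∈ pvPrefs x.toList,
      ((fun p => (((pvPrefs v.toList).map String.ofList).count p : Int)) ∘ String.ofList) q
        = ((pvPrefs v.toList).count q : Int) := by
    intro q _
    simp only [Function.comp_apply]
    rw [List.count_map_of_injective _ _ pvInjOfList]
  rw [List.map_congr_left hc]
  rw [show pvPrefs x.toList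
        = (List.range x.toList.length).map (fun k => x.toList.take (k+1)) from rfl]
  rw [List.map_map]
  exact pvPairSum x.toList v.toList

theorem pvScore (words : List String) (x : String) :
    (PySem.List.pyRange 0 (PySem.Str.len x) 1).foldl
      (fun count i => count +
        (words.foldl
          (fun mp word =>
            (PySem.List.pyRange 0 (PySem.Str.len word) 1).foldl
              (fun mp i => mp.modify (PySem.Str.slice word none (some (i + 1))) 0 (· + 1)) mp)
          (PySem.Dict.empty : PySem.Dict String Int)).getD
          (PySem.Str.slice x none (some (i + 1))) 0) 0
    = (words.map (fun v => pvLcp x.toList v.toList)).sum := by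
  rw [pvLoopPrefs x (fun count p => count +
      (words.foldl
        (fun mp word =>
          (PySem.List.pyRange 0 (PySem.Str.len word) 1).foldl
            (fun mp i => mp.modify (PySem.Str.slice word none (some (i + 1))) 0 (· + 1)) mp)
        (PySem.Dict.empty : PySem.Dict String Int)).getD p 0) 0]
  rw [PySem.List.foldl_add, zero_add]
  rw [List.map_congr_left (fun p _ => pvGetDBuild words p)]
  have hc : ∀ p ∈ pvPrefsS x,
      ((words.flatMap pvPrefsS).count p : Int)
        = (words.map (fun v => ((pvPrefsS v).count p : Int))).sum :=
    fun p _ => pvCountFlatMap words pvPrefsS p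
  rw [List.map_congr_left hc, pvSumSwap]
  exact congrArg List.sum (List.map_congr_left (fun v _ => pvInner x v))

theorem sumPrefixScores2_eq (words : List String) :
    sumPrefixScores2 words = sumPrefixScores2_alt words := by
  simp only [sumPrefixScores2, sumPrefixScores2_alt]
  rw [PySem.List.foldl_congr_mem _ _
    (fun res word => res ++ [(words.map (fun v => pvLcp word.toList v.toList)).sum]) _
    (fun res word _ => by rw [pvScore words word])]
  rw [PySem.List.foldl_append_singleton_eq_map, List.nil_append]

-- ===== VERDICT (by name: the statement is the Claim_ definition above) =====
theorem sumPrefixScores2_spec : Claim_equal_sumPrefixScores2 := by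
  intro words _
  unfold Spec_sumPrefixScores2
  exact sumPrefixScores2_eq words
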